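-- pv_equiv track=rewrite | github.com/ShiroVEVO/Ciencias-de-la-computacion-lll | Analizador Lexico/tokens.py | obtener_numero
-- ===== SOURCE A (Python) =====
-- def obtener_numero(cadena, i):
--     j = i
--     punto_decimal = False
--     parte_decimal = False
--
--     while j < len(cadena):
--         if cadena[j].isdigit():
--             parte_decimal = True
--         elif cadena[j] == '.' and not punto_decimal and parte_decimal:
--             punto_decimal = True
--         else:
--             break
--         j += 1
--
--     if punto_decimal and parte_decimal:
--         return j, ['NUMERO FLOTANTE', cadena[i:j]]
--     else:
--         return j, ['NUMERO ENTERO', cadena[i:j]]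
-- ===== SOURCE B (Python) =====
-- def obtener_numero(cadena, i):
--     n = len(cadena)
--     # phase 1: run of digits
--     j = i
--     while j < n and cadena[j].isdigit():
--         j += 1
--     # phase 2: optional dot (only after at least one digit) + second digit run
--     es_flotante = False
--     if j > i and j < n and cadena[j] == '.':
--         es_flotante = True
--         j += 1
--         while j < n and cadena[j].isdigit():
--             j += 1
--     tipo = 'NUMERO FLOTANTE' if es_flotante else 'NUMERO ENTERO'
--     return j, [tipo, cadena[i:j]]
-- ===== Notes on version B (the rewrite author's own statement) =====
-- stated objective: simpler
-- what changed: A's single while-loop threading two boolean flags (punto_decimal, parte_decimal) is replaced by two explicit scan phases: a first digit run, then an optional dot (taken only if a digit was consumed) followed by a second digit run, with the float label decided by whether the dot was consumed.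
import Mathlib
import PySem

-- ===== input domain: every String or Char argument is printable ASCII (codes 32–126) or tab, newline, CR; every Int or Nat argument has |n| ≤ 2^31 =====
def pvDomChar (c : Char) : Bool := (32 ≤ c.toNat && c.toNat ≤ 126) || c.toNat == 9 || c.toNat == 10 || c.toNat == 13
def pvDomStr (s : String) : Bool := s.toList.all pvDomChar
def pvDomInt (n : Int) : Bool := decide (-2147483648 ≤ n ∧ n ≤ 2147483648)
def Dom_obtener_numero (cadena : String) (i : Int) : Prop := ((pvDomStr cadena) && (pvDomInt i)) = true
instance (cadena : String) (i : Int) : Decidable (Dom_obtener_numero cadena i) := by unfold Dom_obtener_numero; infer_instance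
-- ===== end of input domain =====

-- B replaces A's single three-flag while-loop by two explicit digit-run scans with an optional
-- dot in between (objective: simpler decomposition, same cost).

-- ===== PORT A =====
-- the while-loop of A: state (j, punto_decimal, parte_decimal)
def obtLoopA (cs : List Char) (j : Int) (punto parte : Bool) : Int × Bool × Bool :=
  if _h : j < (cs.length : Int) then
    match PySem.List.pyGet? cs j with
    | some c =>
      if PySem.Chars.isdigit c then obtLoopA cs (j + 1) punto true
      else if c = '.' ∧ punto = false ∧ parte = true then obtLoopA cs (j + 1) true parte
      else (j, punto, parte)
    | none => (j, punto, parte)   -- IndexError in Python (j < -len); excluded by Pre_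
  else (j, punto, parte)
termination_by ((cs.length : Int) - j).toNat
decreasing_by omega; omega

def obtener_numero (cadena : String) (i : Int) : Int × List String :=
  let cs := cadena.toList
  let r := obtLoopA cs i false false
  let tok := String.ofList (PySem.List.slice cs (some i) (some r.1))
  if r.2.1 = true ∧ r.2.2 = true then (r.1, ["NUMERO FLOTANTE", tok])
  else (r.1, ["NUMERO ENTERO", tok])

-- ===== PORT B =====
-- Source B's digit-run scan: smallest k ≥ j at which the run of digits starting at j ends
def digitsEnd (cs : List Char) (j : Int) : Int :=
  if _h : j < (cs.length : Int) then
    match PySem.List.pyGet? cs j with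
    | some c => if PySem.Chars.isdigit c then digitsEnd cs (j + 1) else j
    | none => j   -- IndexError in Python (j < -len); excluded by Pre_
  else j
termination_by ((cs.length : Int) - j).toNat
decreasing_by omega

def obtener_numero_alt (cadena : String) (i : Int) : Int × List String :=
  let cs := cadena.toList
  let j1 := digitsEnd cs i
  let r : Int × Bool :=
    if i < j1 ∧ j1 < (cs.length : Int) ∧ PySem.List.pyGet? cs j1 = some '.'
    then (digitsEnd cs (j1 + 1), true) else (j1, false)
  let tipo := if r.2 = true then "NUMERO FLOTANTE" else "NUMERO ENTERO"
  (r.1, [tipo, String.ofList (PySem.List.slice cs (some i) (some r.1))])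

-- ===== PRECONDITION & SPEC =====
-- Pre_ excludes exactly the inputs where Python A raises IndexError: i below -len(cadena).
def Pre_obtener_numero (cadena : String) (i : Int) : Prop :=
  -(cadena.toList.length : Int) ≤ i
instance (cadena : String) (i : Int) : Decidable (Pre_obtener_numero cadena i) := by
  unfold Pre_obtener_numero; infer_instance

def pvWitness_obtener_numero : String × Int := ("12.5x", 0)

def Spec_obtener_numero (cadena : String) (i : Int) (out : Int × List String) : Prop := out = obtener_numero_alt cadena i
instance (cadena : String) (i : Int) (out : Int × List String) : Decidable (Spec_obtener_numero cadena i out) := by unfold Spec_obtener_numero; infer_instance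

-- ===== CLAIM (what is proved, stated in full; the proofs are below) =====
def Claim_equal_obtener_numero : Prop := ∀ (cadena : String) (i : Int), Dom_obtener_numero cadena i → Pre_obtener_numero cadena i → Spec_obtener_numero cadena i (obtener_numero cadena i)

-- ===== LEMMAS AND PROOFS =====

lemma le_digitsEnd (cs : List Char) (j : Int) : j ≤ digitsEnd cs j := by
  rw [digitsEnd]
  split
  · rcases h : PySem.List.pyGet? cs j with _ | c
    · simp
    · simp only []
      split
      · have := le_digitsEnd cs (j + 1); omega
      · omega
  · omega
termination_by ((cs.length : Int) - j).toNat
decreasing_by omega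

-- phase 2 of A (after the dot): the loop is exactly a digit-run scan
lemma loopA_phase2 (cs : List Char) (j : Int) :
    obtLoopA cs j true true = (digitsEnd cs j, true, true) := by
  rw [obtLoopA, digitsEnd]
  split
  · rcases h : PySem.List.pyGet? cs j with _ | c
    · simp
    · simp only []
      split
      · exact loopA_phase2 cs (j + 1)
      · simp
  · rfl
termination_by ((cs.length : Int) - j).toNat
decreasing_by omega

-- phase 1 of A: digit run, then optionally a dot (if a digit was consumed) followed by phase 2
lemma loopA_phase1 (cs : List Char) (j : Int) (b : Bool) :
    obtLoopA cs j false b =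
      if digitsEnd cs j < (cs.length : Int) ∧ PySem.List.pyGet? cs (digitsEnd cs j) = some '.' ∧
          (b || decide (j < digitsEnd cs j)) = true
      then (digitsEnd cs (digitsEnd cs j + 1), true, b || decide (j < digitsEnd cs j))
      else (digitsEnd cs j, false, b || decide (j < digitsEnd cs j)) := by
  rw [obtLoopA]
  by_cases hj : j < (cs.length : Int)
  · simp only [dif_pos hj]
    rcases h : PySem.List.pyGet? cs j with _ | c
    · have hd : digitsEnd cs j = j := by rw [digitsEnd, dif_pos hj, h]
      simp [hd, h]
    · dsimp only
      by_cases hdig : PySem.Chars.isdigit c = true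
      -- digit: the run continues
      · have hd : digitsEnd cs j = digitsEnd cs (j + 1) := by
          rw [digitsEnd, dif_pos hj, h]; exact if_pos hdig
        have hle : j + 1 ≤ digitsEnd cs (j + 1) := le_digitsEnd cs (j + 1)
        rw [if_pos hdig, loopA_phase1 cs (j + 1) true, hd]
        have h1 : (true || decide (j + 1 < digitsEnd cs (j + 1))) = true := by simp
        have h2 : (b || decide (j < digitsEnd cs (j + 1))) = true := by
          simp only [Bool.or_eq_true, decide_eq_true_eq]; omega
        rw [h1, h2]
      · have hd : digitsEnd cs j = j := by
          rw [digitsEnd, dif_pos hj, h]; exact if_neg hdig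
        rw [if_neg hdig]
        by_cases hdot : c = '.' ∧ True ∧ b = true
        · -- dot accepted after a digit: phase 2
          obtain ⟨hc, -, hb⟩ := hdot
          subst hb
          rw [if_pos (show c = '.' ∧ True ∧ true = true from ⟨hc, trivial, rfl⟩),
              loopA_phase2]
          have hcond : digitsEnd cs j < (cs.length : Int) ∧
              PySem.List.pyGet? cs (digitsEnd cs j) = some '.' ∧
              (true || decide (j < digitsEnd cs j)) = true := ⟨by omega, by rw [hd, h, hc], by simp⟩
          rw [if_pos hcond, hd]
          simp
        · rw [if_neg hdot]
          have hnb : (b || decide (j < digitsEnd cs j)) = b := by simp [hd]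
          have hcond : ¬ (digitsEnd cs j < (cs.length : Int) ∧
              PySem.List.pyGet? cs (digitsEnd cs j) = some '.' ∧
              (b || decide (j < digitsEnd cs j)) = true) := by
            rintro ⟨-, hget, hbb⟩
            rw [hd, h] at hget
            exact hdot ⟨by injection hget, trivial, by rw [hnb] at hbb; exact hbb⟩
          rw [if_neg hcond, hd]
          simp [hd] at hnb ⊢
  · simp only [dif_neg hj]
    have hd : digitsEnd cs j = j := by rw [digitsEnd, dif_neg hj]
    rw [hd]
    have : ¬ (j < (cs.length : Int) ∧ PySem.List.pyGet? cs j = some '.' ∧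
        (b || decide (j < j)) = true) := by rintro ⟨h1, -⟩; exact hj h1
    rw [if_neg this]
    simp
termination_by ((cs.length : Int) - j).toNat
decreasing_by omega

-- ===== VERDICT (by name: the statement is the Claim_ definition above) =====
theorem obtener_numero_spec : Claim_equal_obtener_numero := by
  unfold Claim_equal_obtener_numero Spec_obtener_numero
  intro cadena i _ _
  unfold obtener_numero obtener_numero_alt
  simp only [loopA_phase1, Bool.false_or]
  set cs := cadena.toList
  set d := digitsEnd cs i with hd
  by_cases hcond : d < (cs.length : Int) ∧ PySem.List.pyGet? cs d = some '.' ∧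
      decide (i < d) = true
  · obtain ⟨h1, h2, h3⟩ := hcond
    have h3' : i < d := by simpa using h3
    rw [if_pos (⟨h1, h2, h3⟩ : d < (cs.length : Int) ∧ PySem.List.pyGet? cs d = some '.' ∧
          decide (i < d) = true),
        if_pos (⟨h3', h1, h2⟩ : i < d ∧ d < (cs.length : Int) ∧
          PySem.List.pyGet? cs d = some '.')]
    simp [h3']
  · rw [if_neg hcond]
    have hcond' : ¬ (i < d ∧ d < (cs.length : Int) ∧ PySem.List.pyGet? cs d = some '.') := by
      rintro ⟨h1, h2, h3⟩; exact hcond ⟨h2, h3, by simpa using h1⟩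
    rw [if_neg hcond']
    rcases hb : decide (i < d) with _ | _ <;> simp
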